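-- pv_equiv track=rewrite | github.com/DanisTeng/Graph1020 | regulation 1d/utils.py | head_equal
-- ===== SOURCE A (Python) =====
-- def head_equal(head1, head2):
--     assert isinstance(head1, list)
--     assert isinstance(head2, list)
--
--     if len(head1) != len(head2):
--         return False
--
--     for i in range(len(head1)):
--         if not isinstance(head2[i], type(head1[i])):
--             return False
--         if not head1 == head2:
--             return False
--     return True
-- ===== SOURCE B (Python) =====
-- def head_equal(head1, head2):
--     assert isinstance(head1, list)
--     assert isinstance(head2, list)
--     if len(head1) != len(head2):
--         return False
--     return all(isinstance(b, type(a)) and a == b for a, b in zip(head1, head2))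
-- ===== Notes on version B (the rewrite author's own statement) =====
-- stated objective: faster
-- what changed: A re-compares the whole lists inside the loop on every index (O(n^2)); B does one zip pass checking each pair's type and value once.
import Mathlib
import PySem

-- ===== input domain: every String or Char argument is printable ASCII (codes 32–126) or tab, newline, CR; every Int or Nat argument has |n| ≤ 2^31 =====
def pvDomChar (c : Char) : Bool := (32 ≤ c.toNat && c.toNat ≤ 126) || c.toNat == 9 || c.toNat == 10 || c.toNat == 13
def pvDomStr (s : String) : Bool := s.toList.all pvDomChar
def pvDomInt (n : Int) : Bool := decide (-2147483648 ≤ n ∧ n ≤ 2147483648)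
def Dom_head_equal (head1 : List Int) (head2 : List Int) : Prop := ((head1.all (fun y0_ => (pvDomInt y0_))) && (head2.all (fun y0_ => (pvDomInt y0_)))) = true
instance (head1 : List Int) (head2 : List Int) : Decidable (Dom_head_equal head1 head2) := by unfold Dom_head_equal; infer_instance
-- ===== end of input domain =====

-- B replaces A's per-index re-comparison of the WHOLE lists by a single zip pass (one value check per pair).
-- On List Int the isinstance checks of both programs are vacuously true and are omitted from the ports.

-- ===== PORT A =====
-- the 'for i in range(len(head1))' loop: at each i the isinstance check (always true on Int),
-- then 'if not head1 == head2: return False'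
def head_equalLoop (head1 : List Int) (head2 : List Int) (i n : Nat) : Bool :=
  if i < n then
    if ¬ (head1 == head2) then false
    else head_equalLoop head1 head2 (i + 1) n
  else true
termination_by n - i

def head_equal (head1 : List Int) (head2 : List Int) : Bool :=
  if head1.length ≠ head2.length then false
  else head_equalLoop head1 head2 0 head1.length

-- ===== PORT B =====
def head_equal_alt (head1 : List Int) (head2 : List Int) : Bool :=
  if head1.length ≠ head2.length then false
  else (head1.zip head2).all (fun p => p.1 == p.2)

-- ===== PRECONDITION & SPEC =====
def Spec_head_equal (head1 : List Int) (head2 : List Int) (out : Bool) : Prop := out = head_equal_alt head1 head2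
instance (head1 : List Int) (head2 : List Int) (out : Bool) : Decidable (Spec_head_equal head1 head2 out) := by unfold Spec_head_equal; infer_instance

-- ===== CLAIM (what is proved, stated in full; the proofs are below) =====
def Claim_equal_head_equal : Prop := ∀ (head1 : List Int) (head2 : List Int), Dom_head_equal head1 head2 → Spec_head_equal head1 head2 (head_equal head1 head2)

-- ===== LEMMAS AND PROOFS =====

-- A's loop body never changes the lists: it returns true iff the lists are equal or the loop is empty.
theorem head_equalLoop_eq (head1 head2 : List Int) (i n : Nat) :
    head_equalLoop head1 head2 i n = (if i < n then head1 == head2 else true) := by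
  unfold head_equalLoop
  by_cases h : i < n
  · cases hb : (head1 == head2) with
    | false => simp [h, hb]
    | true => rw [head_equalLoop_eq head1 head2 (i + 1) n]; simp [h, hb]
  · simp [h]
termination_by n - i

-- With equal lengths, the elementwise zip pass decides list equality.
theorem zip_all_eq (head1 head2 : List Int) (h : head1.length = head2.length) :
    ((head1.zip head2).all (fun p => p.1 == p.2)) = (head1 == head2) := by
  induction head1 generalizing head2 with
  | nil => cases head2 <;> simp_all
  | cons a t ih =>
    cases head2 with
    | nil => simp_all
    | cons b t2 =>
      simp only [List.length_cons, Nat.add_right_cancel_iff] at h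
      simp only [List.zip_cons_cons, List.all_cons, List.cons_beq_cons, ih t2 h]

-- ===== VERDICT (by name: the statement is the Claim_ definition above) =====
theorem head_equal_spec : Claim_equal_head_equal := by
  unfold Claim_equal_head_equal
  intro head1 head2 _
  unfold Spec_head_equal head_equal head_equal_alt
  split_ifs with h
  · rfl
  · push Not at h
    rw [head_equalLoop_eq, zip_all_eq head1 head2 h]
    by_cases hl : 0 < head1.length
    · simp [hl]
    · have h1 : head1 = [] := List.length_eq_zero_iff.mp (by omega)
      have h2 : head2 = [] := List.length_eq_zero_iff.mp (by omega)
      simp [h1, h2]
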